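-- pv_equiv track=rewrite | github.com/andyW296/quafu-chemistry | src/hamiltonian.py | sort_pauli
-- ===== SOURCE A (Python) =====
-- def sort_pauli(old_string):
--     pauli_string_ele=old_string.split()
--     index=[]
--     for pauli_string in pauli_string_ele:
--         index.append(int(pauli_string[1]))
--     largest_qubit=max(index)
--     new_string=''
--     first=0
--     for i in range(largest_qubit+1):
--         for pauli_string in pauli_string_ele:
--             if (int(pauli_string[1])==i):
--                 if (first==0):
--                     first+=1
--                 else:
--                     new_string+=' '
--                 new_string+=pauli_string
--     return new_string
-- ===== SOURCE B (Python) =====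
-- def sort_pauli(old_string):
--     terms = old_string.split()
--     buckets = {}
--     for term in terms:
--         buckets.setdefault(int(term[1]), []).append(term)
--     largest_qubit = max(buckets)
--     out = []
--     for i in range(largest_qubit + 1):
--         out.extend(buckets.get(i, []))
--     return ' '.join(out)
-- ===== Notes on version B (the rewrite author's own statement) =====
-- stated objective: alternative
-- what changed: Instead of A's nested loops that rescan the whole token list once per qubit index and grow the result string under a first-token flag, B makes one pass building a dict of index->terms buckets (appending in encounter order) and then emits the buckets for i in range(max_key+1), joining once at the end.
import Mathlib
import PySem

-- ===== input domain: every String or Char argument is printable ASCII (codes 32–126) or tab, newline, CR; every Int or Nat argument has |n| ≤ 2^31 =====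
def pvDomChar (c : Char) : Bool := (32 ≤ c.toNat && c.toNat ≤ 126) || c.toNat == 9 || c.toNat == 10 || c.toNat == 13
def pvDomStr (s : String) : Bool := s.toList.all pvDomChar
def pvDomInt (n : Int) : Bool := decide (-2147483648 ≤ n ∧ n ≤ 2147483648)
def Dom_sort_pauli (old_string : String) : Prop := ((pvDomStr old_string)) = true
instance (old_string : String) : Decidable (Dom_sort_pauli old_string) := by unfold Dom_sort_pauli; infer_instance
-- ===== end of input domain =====

-- B replaces A's rescan-all-tokens-per-qubit-index nested loops by one bucket-building pass
-- over the tokens plus a single bucket-emission pass joined at the end (objective: alternative).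

-- int(t[1]) of a token, as an Option (none exactly where Python raises IndexError/ValueError)
def pvKey? (t : String) : Option Int :=
  (PySem.Str.pyGet? t 1).bind (fun c => PySem.Int.ofChars? [c])

-- int(t[1]) under Pre_ (where pvKey? is some); the 0 default is never reached inside Pre_
def pvKey (t : String) : Int := (pvKey? t).getD 0

-- ===== PORT A =====
def sort_pauli (old_string : String) : String :=
  let pauli_string_ele := PySem.Str.split₀ old_string
  let index := pauli_string_ele.foldl (fun acc p => acc ++ [pvKey p]) []
  let largest_qubit := (PySem.List.max? index (fun x => x)).getD 0
  let st := (PySem.List.pyRange 0 (largest_qubit + 1) 1).foldl (fun st i =>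
      pauli_string_ele.foldl (fun st p =>
        if pvKey p == i then
          let st' := if st.2 == (0 : Int) then (st.1, st.2 + 1) else (st.1 ++ " ", st.2)
          (st'.1 ++ p, st'.2)
        else st) st) ("", (0 : Int))
  st.1

-- ===== PORT B =====
def sort_pauli_alt (old_string : String) : String :=
  let terms := PySem.Str.split₀ old_string
  let buckets := terms.foldl (fun d t => d.modify (pvKey t) [] (fun l => l ++ [t])) PySem.Dict.empty
  let largest_qubit := (PySem.List.max? buckets.keys (fun k => k)).getD 0
  let out := (PySem.List.pyRange 0 (largest_qubit + 1) 1).foldl (fun acc i => acc ++ buckets.getD i []) []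
  PySem.Str.join " " out

-- ===== PRECONDITION & SPEC =====
-- Pre_ excludes exactly the inputs where the Python A raises: an empty token list
-- (max([]) raises ValueError) or a token on which int(t[1]) raises (IndexError/ValueError).
def Pre_sort_pauli (old_string : String) : Prop :=
  PySem.Str.split₀ old_string ≠ [] ∧
    ∀ t ∈ PySem.Str.split₀ old_string, (pvKey? t).isSome = true
instance (old_string : String) : Decidable (Pre_sort_pauli old_string) := by
  unfold Pre_sort_pauli; infer_instance

def pvWitness_sort_pauli : String := "X1 Z0 Y1"

def Spec_sort_pauli (old_string : String) (out : String) : Prop := out = sort_pauli_alt old_string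
instance (old_string : String) (out : String) : Decidable (Spec_sort_pauli old_string out) := by unfold Spec_sort_pauli; infer_instance

-- ===== CLAIM (what is proved, stated in full; the proofs are below) =====
def Claim_equal_sort_pauli : Prop := ∀ (old_string : String), Dom_sort_pauli old_string → Pre_sort_pauli old_string → Spec_sort_pauli old_string (sort_pauli old_string)

-- ===== LEMMAS AND PROOFS =====

-- the emission step of A's inner loop (the body taken when the token's index matches)
def pvG (st : String × Int) (p : String) : String × Int :=
  let st' := if st.2 == (0 : Int) then (st.1, st.2 + 1) else (st.1 ++ " ", st.2)
  (st'.1 ++ p, st'.2)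

-- ' ' before each token: the characters a ' '.join contributes after its first element
def pvJT : List String → List Char
  | [] => []
  | x :: t => ' ' :: (x.toList ++ pvJT t)

lemma pvG_one (s : String) (p : String) : pvG (s, 1) p = (s ++ " " ++ p, 1) := by
  simp [pvG]

lemma pvEmit_one (L : List String) (s : String) :
    L.foldl pvG (s, 1) = (s ++ String.ofList (pvJT L), 1) := by
  induction L generalizing s with
  | nil => simp [pvJT]
  | cons x t ih =>
      simp only [List.foldl_cons, pvG_one, ih, pvJT]
      refine Prod.ext ?_ rfl
      apply String.toList_inj.mp
      simp [String.toList_append]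

lemma pvJoin_toList (t : List String) (x : String) :
    (PySem.Str.join " " (x :: t)).toList = x.toList ++ pvJT t := by
  induction t generalizing x with
  | nil =>
      simp only [PySem.Str.join, String.toList_ofList, List.map_cons, List.map_nil,
        PySem.Chars.join_singleton, pvJT]
      simp
  | cons y u ih =>
      have hy := ih y
      simp only [PySem.Str.join, String.toList_ofList, List.map_cons] at hy ⊢
      rw [PySem.Chars.join_cons_cons]
      simp only [show (" " : String).toList = [' '] from rfl] at hy
      simp [pvJT, hy]

lemma pvFold_eq_join (L : List String) :
    (L.foldl pvG ("", (0 : Int))).1 = PySem.Str.join " " L := by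
  cases L with
  | nil =>
      apply String.toList_inj.mp
      simp [PySem.Str.join, PySem.Chars.join_nil]
  | cons x t =>
      have hx : pvG ("", (0 : Int)) x = ("" ++ x, 1) := by simp [pvG]
      apply String.toList_inj.mp
      simp only [List.foldl_cons, hx, pvEmit_one]
      simp only [String.toList_append, String.toList_ofList, pvJoin_toList]
      simp

-- folding a loop body over a flatMap is the fold of the per-piece folds
lemma pvFoldl_flatMap {α β δ : Type} (l : List α) (h : α → List β) (g : δ → β → δ) (st : δ) :
    (l.flatMap h).foldl g st = l.foldl (fun st i => (h i).foldl g st) st := by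
  induction l generalizing st with
  | nil => simp
  | cons a t ih => simp [List.foldl_append, ih]

-- max over the deduplicated keys has the same value as max over the raw list
lemma pvMax_ofList (ks : List Int) :
    (PySem.List.max? (PySem.Set.ofList ks) (fun x => x)).getD 0
      = (PySem.List.max? ks (fun x => x)).getD 0 := by
  cases hks : ks with
  | nil => simp
  | cons a t =>
      subst hks
      have hne : a :: t ≠ [] := by simp
      have hne' : (PySem.Set.ofList (a :: t) : List Int) ≠ [] := by
        intro h
        have : a ∈ (PySem.Set.ofList (a :: t) : List Int) := by
          rw [PySem.Set.mem_ofList]; simp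
        simp [h] at this
      cases hm1 : PySem.List.max? (PySem.Set.ofList (a :: t)) (fun x => x) with
      | none =>
          rw [PySem.List.max?_eq_none_iff] at hm1
          exact absurd hm1 hne'
      | some m1 =>
        cases hm2 : PySem.List.max? (a :: t) (fun x => x) with
        | none =>
            rw [PySem.List.max?_eq_none_iff] at hm2
            exact absurd hm2 hne
        | some m2 =>
            have h1m : m1 ∈ PySem.Set.ofList (a :: t) := PySem.List.max?_mem hm1
            have h2m : m2 ∈ (a :: t) := PySem.List.max?_mem hm2
            have h12 : m1 ≤ m2 :=
              PySem.List.max?_isMax hm2 m1 ((PySem.Set.mem_ofList _ _).mp h1m)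
            have h21 : m2 ≤ m1 :=
              PySem.List.max?_isMax hm1 m2 ((PySem.Set.mem_ofList _ _).mpr h2m)
            simpa using le_antisymm h12 h21

-- B's bucket for index i is exactly the tokens whose key is i, in encounter order
lemma pvBucket (toks : List String) (i : Int) :
    (toks.foldl (fun d t => d.modify (pvKey t) [] (fun l => l ++ [t])) PySem.Dict.empty).getD i []
      = toks.filter (fun t => pvKey t == i) := by
  have h := PySem.Dict.getD_foldl_modify_append
      (toks.map (fun t => (pvKey t, t))) (PySem.Dict.empty) i
  rw [List.foldl_map] at h
  simpa [List.filter_map, Function.comp_def, List.map_id] using h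

-- B's key list is the deduplicated key multiset of the tokens
lemma pvKeys (toks : List String) :
    (toks.foldl (fun d t => d.modify (pvKey t) [] (fun l => l ++ [t])) PySem.Dict.empty).keys
      = PySem.Set.ofList (toks.map pvKey) := by
  have h := PySem.Dict.keys_foldl_modify_key toks pvKey ([] : List String)
      (fun _ t => fun l => l ++ [t]) PySem.Dict.empty
  simpa [PySem.Set.update, PySem.Set.ofList_eq_foldl] using h

-- ===== VERDICT (by name: the statement is the Claim_ definition above) =====
theorem sort_pauli_spec : Claim_equal_sort_pauli := by
  intro old_string _hdom _hpre
  unfold Spec_sort_pauli sort_pauli sort_pauli_alt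
  dsimp only
  set toks := PySem.Str.split₀ old_string with htoks
  -- A's index list is the map of keys
  rw [PySem.List.foldl_append_singleton_eq_map]
  simp only [List.nil_append]
  -- the two largest_qubit values agree
  rw [pvKeys, pvMax_ofList]
  set m := (PySem.List.max? (toks.map pvKey) (fun x => x)).getD 0 with hm
  -- B's emission list is the flatMap of buckets = flatMap of filters
  have hout : (PySem.List.pyRange 0 (m + 1) 1).foldl
      (fun acc i => acc ++ (toks.foldl (fun d t => d.modify (pvKey t) [] (fun l => l ++ [t])) PySem.Dict.empty).getD i []) []
      = (PySem.List.pyRange 0 (m + 1) 1).flatMap (fun i => toks.filter (fun t => pvKey t == i)) := by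
    simp only [pvBucket]
    simpa using PySem.List.foldl_append_eq_flatMap
      (fun i => toks.filter (fun t => pvKey t == i)) (PySem.List.pyRange 0 (m + 1) 1) []
  rw [hout]
  -- A's nested loops are the fold of pvG over the same flatMap
  have hinner : ∀ (st : String × Int) (i : Int),
      toks.foldl (fun st p =>
        if pvKey p == i then
          let st' := if st.2 == (0 : Int) then (st.1, st.2 + 1) else (st.1 ++ " ", st.2)
          (st'.1 ++ p, st'.2)
        else st) st = (toks.filter (fun p => pvKey p == i)).foldl pvG st := by
    intro st i
    exact PySem.List.foldl_if_eq_foldl_filter (fun p => pvKey p == i) pvG toks st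
  simp only [hinner]
  rw [← pvFoldl_flatMap]
  exact pvFold_eq_join _
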